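-- pv_equiv track=rewrite | github.com/AT190510-Cuong/ThuatToanATTT | cuoi_ky/phan_1/cau_21.py | super_prime
-- ===== SOURCE A (Python) =====
-- import math
--
-- def check_snt(n):
--     if n<2:
--         return False
--     else:
--         for i in range(2,int(math.sqrt(n)+1)):
--             if n % i ==0:
--                 return False
--         return True
--
-- def super_prime(number_a, number_b):
--     result_list = []
--     for x in range(number_a, number_b + 1):
--         count = 0
--         for i in range(1, x):
--             if check_snt(i) and i % 2 != 0 or i == 2:
--                 count += 1
--         if count % 2 != 0 or count == 2:
--             if check_snt(count):
--                 result_list.append(x)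
--     return result_list
-- ===== SOURCE B (Python) =====
-- import math
--
-- def super_prime(number_a, number_b):
--     # Running prime-count: A's per-x inner condition "(check_snt(i) and i%2!=0) or i==2"
--     # is exactly "i is prime", and its final test "(count%2!=0 or count==2) and check_snt(count)"
--     # is exactly "count is prime"; so keep count = #primes below x incrementally.
--     def is_prime(n):
--         return n >= 2 and all(n % d != 0 for d in range(2, math.isqrt(n) + 1))
--     if number_b < number_a:
--         return []
--     count = sum(1 for i in range(1, number_a) if is_prime(i))
--     out = []
--     for x in range(number_a, number_b + 1):
--         if is_prime(count):
--             out.append(x)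
--         count += is_prime(x)
--     return out
-- ===== Notes on version B (the rewrite author's own statement) =====
-- stated objective: alternative
-- what changed: B maintains one running prime count incremented as x advances (computing the count below number_a once, and returning [] at once on an empty range), instead of A's recount of all primes below x by trial division for every x, and tests the collapsed condition 'count is prime' which A spells as '(count%2!=0 or count==2) and check_snt(count)'.
import Mathlib
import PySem

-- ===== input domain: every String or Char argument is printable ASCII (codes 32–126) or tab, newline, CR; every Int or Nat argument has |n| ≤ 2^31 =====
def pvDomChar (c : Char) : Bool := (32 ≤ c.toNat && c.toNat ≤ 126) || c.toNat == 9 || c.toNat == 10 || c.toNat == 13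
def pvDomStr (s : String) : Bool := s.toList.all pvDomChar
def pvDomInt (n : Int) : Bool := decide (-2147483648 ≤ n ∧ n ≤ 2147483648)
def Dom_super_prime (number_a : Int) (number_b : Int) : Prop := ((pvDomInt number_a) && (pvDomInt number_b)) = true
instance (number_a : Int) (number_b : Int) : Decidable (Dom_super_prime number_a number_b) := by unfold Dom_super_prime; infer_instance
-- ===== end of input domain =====

-- B replaces A's per-x recount of the primes below x by a single running prime count and collapses A's prime test of that count into one condition (alternative algorithm, fewer inner passes).

-- ===== PORT A =====
-- A's `int(math.sqrt(n)+1)` is ported as `Nat.sqrt n + 1`: for 2 ≤ n ≤ 2^31 the float bound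
-- can at most add the one extra trial divisor isqrt(n)+1, which never changes the returned Bool
-- (if it divided n, a smaller tested divisor would already have divided n), so the port is
-- exact on the domain in its result.
def check_snt (n : Int) : Bool :=
  if n < 2 then false
  else (PySem.List.pyRange 2 ((Nat.sqrt n.toNat : Int) + 1) 1).all
    (fun i => decide (PySem.Int.mod n i ≠ 0))

def super_prime (number_a : Int) (number_b : Int) : List Int :=
  (PySem.List.pyRange number_a (number_b + 1) 1).foldl
    (fun result_list x =>
      let count : Int :=
        (PySem.List.pyRange 1 x 1).foldl
          (fun count i =>
            if (check_snt i && decide (PySem.Int.mod i 2 ≠ 0)) || decide (i = 2)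
            then count + 1 else count) 0
      if (decide (PySem.Int.mod count 2 ≠ 0) || decide (count = 2)) && check_snt count
      then result_list ++ [x] else result_list)
    []

-- ===== PORT B =====
-- B's helper `n >= 2 and all(n % d != 0 for d in range(2, math.isqrt(n) + 1))`
def is_prime (n : Int) : Bool :=
  decide (2 ≤ n) && (PySem.List.pyRange 2 ((Nat.sqrt n.toNat : Int) + 1) 1).all
    (fun d => decide (PySem.Int.mod n d ≠ 0))

def super_prime_alt (number_a : Int) (number_b : Int) : List Int :=
  if number_b < number_a then []
  else
  let count : Int :=
    (PySem.List.pyRange 1 number_a 1).foldl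
      (fun s i => if is_prime i then s + 1 else s) 0
  ((PySem.List.pyRange number_a (number_b + 1) 1).foldl
      (fun st x =>
        let out := if is_prime st.2 then st.1 ++ [x] else st.1
        (out, st.2 + if is_prime x then (1 : Int) else 0))
      (([] : List Int), count)).1

-- ===== PRECONDITION & SPEC =====
def Spec_super_prime (number_a : Int) (number_b : Int) (out : List Int) : Prop := out = super_prime_alt number_a number_b
instance (number_a : Int) (number_b : Int) (out : List Int) : Decidable (Spec_super_prime number_a number_b out) := by unfold Spec_super_prime; infer_instance

-- ===== CLAIM (what is proved, stated in full; the proofs are below) =====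
def Claim_equal_super_prime : Prop := ∀ (number_a : Int) (number_b : Int), Dom_super_prime number_a number_b → Spec_super_prime number_a number_b (super_prime number_a number_b)

-- ===== LEMMAS AND PROOFS =====

-- the running count maintained by B, as a function of x: number of primes in [1, x)
def cnt (x : Int) : Int :=
  (PySem.List.pyRange 1 x 1).foldl (fun s i => if is_prime i then s + 1 else s) 0

theorem is_prime_eq_check_snt (n : Int) : is_prime n = check_snt n := by
  unfold is_prime check_snt
  by_cases h : n < 2
  · have : ¬ (2 ≤ n) := by omega
    simp [h, this]
  · have : 2 ≤ n := by omega
    simp [h, this]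

theorem sqrt_two_eq : Nat.sqrt 2 = 1 := by
  have h1 : 1 ≤ Nat.sqrt 2 := Nat.le_sqrt.mpr (by norm_num)
  have h2 : Nat.sqrt 2 < 2 := Nat.sqrt_lt.mpr (by norm_num)
  omega

theorem check_snt_two : check_snt 2 = true := by
  unfold check_snt
  have h : (((2 : Int).toNat.sqrt : Int)) = 1 := by
    rw [show (2 : Int).toNat = 2 from rfl, sqrt_two_eq]; rfl
  rw [if_neg (by omega), h, show (1 : Int) + 1 = 2 from rfl,
    PySem.List.pyRange_one_eq_nil le_rfl]
  rfl

theorem check_snt_even (n : Int) (he : PySem.Int.mod n 2 = 0) (hne : n ≠ 2) :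
    check_snt n = false := by
  have hdvd : (2 : Int) ∣ n := (PySem.Int.mod_eq_zero_iff_dvd n 2).mp he
  unfold check_snt
  by_cases h : n < 2
  · simp [h]
  · have h4 : 4 ≤ n := by
      obtain ⟨k, hk⟩ := hdvd
      omega
    have hsq : 2 ≤ Nat.sqrt n.toNat := Nat.le_sqrt.mpr (by omega)
    simp only [h, if_false]
    rw [List.all_eq_false]
    refine ⟨2, ?_, ?_⟩
    · rw [PySem.List.mem_pyRange_one]
      constructor
      · omega
      · have : (2 : Int) ≤ (Nat.sqrt n.toNat : Int) := by exact_mod_cast hsq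
        omega
    · simp
      exact hdvd

theorem mod_two_ne_zero (i : Int) (h : PySem.Int.mod i 2 ≠ 0) : i % 2 = 1 := by
  rw [PySem.Int.mod_eq_emod_of_pos (by omega : (0:Int) < 2)] at h
  omega

theorem condA_eq (i : Int) :
    ((check_snt i && decide (PySem.Int.mod i 2 ≠ 0)) || decide (i = 2)) = is_prime i := by
  rw [is_prime_eq_check_snt]
  by_cases h2 : i = 2
  · subst h2; simp [check_snt_two]
  · simp only [h2, decide_false, Bool.or_false]
    by_cases hp : check_snt i = true
    · have hm : PySem.Int.mod i 2 ≠ 0 := by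
        intro he
        rw [check_snt_even i he h2] at hp
        exact absurd hp (by simp)
      simp [hp, mod_two_ne_zero i hm]
    · simp [Bool.not_eq_true] at hp
      simp [hp]

theorem condOut_eq (c : Int) :
    ((decide (PySem.Int.mod c 2 ≠ 0) || decide (c = 2)) && check_snt c) = is_prime c := by
  rw [is_prime_eq_check_snt]
  by_cases h2 : c = 2
  · subst h2; simp [check_snt_two]
  · simp only [h2, decide_false, Bool.or_false]
    by_cases hp : check_snt c = true
    · have hm : PySem.Int.mod c 2 ≠ 0 := by
        intro he
        rw [check_snt_even c he h2] at hp
        exact absurd hp (by simp)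
      simp [hp, mod_two_ne_zero c hm]
    · simp [Bool.not_eq_true] at hp
      simp [hp]

theorem cnt_succ (x : Int) :
    cnt (x + 1) = cnt x + (if is_prime x then (1 : Int) else 0) := by
  unfold cnt
  by_cases h : 1 ≤ x
  · rw [PySem.List.pyRange_one_succ_right h, List.foldl_append]
    simp only [List.foldl_cons, List.foldl_nil]
    split_ifs <;> omega
  · have h1 : x + 1 ≤ 1 := by omega
    have h0 : x ≤ 1 := by omega
    rw [PySem.List.pyRange_one_eq_nil h1, PySem.List.pyRange_one_eq_nil h0]
    have : is_prime x = false := by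
      unfold is_prime
      have : ¬ (2 ≤ x) := by omega
      simp [this]
    simp [this]

-- B's stateful loop produces the same list as a pure filter-style fold keyed by `cnt`
theorem loopB (n : ℕ) : ∀ (a : Int) (acc : List Int),
    ((PySem.List.pyRange a (a + n) 1).foldl
        (fun st x =>
          let out := if is_prime st.2 then st.1 ++ [x] else st.1
          (out, st.2 + if is_prime x then (1 : Int) else 0))
        (acc, cnt a)).1
    = (PySem.List.pyRange a (a + n) 1).foldl
        (fun r x => if is_prime (cnt x) then r ++ [x] else r) acc := by
  induction n with
  | zero =>
    intro a acc
    simp only [Nat.cast_zero, add_zero, PySem.List.pyRange_one_eq_nil le_rfl, List.foldl_nil]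
  | succ m ih =>
    intro a acc
    have hlt : a < a + ((m + 1 : ℕ) : Int) := by push_cast; omega
    rw [PySem.List.pyRange_one_cons hlt]
    simp only [List.foldl_cons]
    have harr : a + ((m + 1 : ℕ) : Int) = (a + 1) + (m : ℕ) := by push_cast; ring
    rw [harr]
    rw [show cnt a + (if is_prime a then (1:Int) else 0) = cnt (a + 1) from (cnt_succ a).symm]
    exact ih (a + 1) (if is_prime (cnt a) then acc ++ [a] else acc)

theorem cnt_eq_inner (x : Int) :
    ((PySem.List.pyRange 1 x 1).foldl
        (fun count i =>
          if (check_snt i && decide (PySem.Int.mod i 2 ≠ 0)) || decide (i = 2)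
          then count + 1 else count) (0 : Int)) = cnt x := by
  unfold cnt
  apply PySem.List.foldl_congr_mem
  intro acc i _
  rw [condA_eq]

-- ===== VERDICT (by name: the statement is the Claim_ definition above) =====
theorem super_prime_spec : Claim_equal_super_prime := by
  intro a b _
  unfold Spec_super_prime
  unfold super_prime super_prime_alt
  -- rewrite A's fold into the pure filter-style fold keyed by cnt
  have hA : ∀ (l : List Int) (acc : List Int),
      l.foldl (fun result_list x =>
        let count : Int :=
          (PySem.List.pyRange 1 x 1).foldl
            (fun count i =>
              if (check_snt i && decide (PySem.Int.mod i 2 ≠ 0)) || decide (i = 2)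
              then count + 1 else count) 0
        if (decide (PySem.Int.mod count 2 ≠ 0) || decide (count = 2)) && check_snt count
        then result_list ++ [x] else result_list) acc
      = l.foldl (fun r x => if is_prime (cnt x) then r ++ [x] else r) acc := by
    intro l acc
    apply PySem.List.foldl_congr_mem
    intro r x _
    simp only [cnt_eq_inner, condOut_eq]
  rw [hA]
  by_cases hab : a ≤ b
  · rw [if_neg (by omega)]
    have hn : b + 1 = a + ((b + 1 - a).toNat : ℕ) := by omega
    rw [hn]
    exact (loopB (b + 1 - a).toNat a []).symm
  · rw [if_pos (by omega)]
    have h1 : b + 1 ≤ a := by omega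
    rw [PySem.List.pyRange_one_eq_nil h1]
    simp
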